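-- pv_equiv track=rewrite | github.com/nishio/nothanks | nothanks_cui.py | score_cards
-- ===== SOURCE A (Python) =====
-- from typing import List, Set, Optional, Dict, Tuple
--
-- def score_cards(cards: Set[int]) -> int:
--     """Card points: sum of the lowest card in each consecutive run."""
--     if not cards:
--         return 0
--     s = set(cards)
--     total = 0
--     for c in s:
--         if (c - 1) not in s:
--             total += c
--     return total
-- ===== SOURCE B (Python) =====
-- def score_cards(cards):
--     """Card points: sum of the lowest card in each consecutive run."""
--     total = 0
--     prev = None
--     for c in sorted(cards):
--         if prev is None or c > prev + 1:
--             total += c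
--         prev = c
--     return total
-- ===== Notes on version B (the rewrite author's own statement) =====
-- stated objective: idiomatic
-- what changed: Replaces the set build plus per-element hash membership test (c-1 in s) with a single ordered scan of the sorted input that detects run starts by adjacency to the previous element; duplicates contribute nothing because equal neighbours are not gaps.
import Mathlib
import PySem

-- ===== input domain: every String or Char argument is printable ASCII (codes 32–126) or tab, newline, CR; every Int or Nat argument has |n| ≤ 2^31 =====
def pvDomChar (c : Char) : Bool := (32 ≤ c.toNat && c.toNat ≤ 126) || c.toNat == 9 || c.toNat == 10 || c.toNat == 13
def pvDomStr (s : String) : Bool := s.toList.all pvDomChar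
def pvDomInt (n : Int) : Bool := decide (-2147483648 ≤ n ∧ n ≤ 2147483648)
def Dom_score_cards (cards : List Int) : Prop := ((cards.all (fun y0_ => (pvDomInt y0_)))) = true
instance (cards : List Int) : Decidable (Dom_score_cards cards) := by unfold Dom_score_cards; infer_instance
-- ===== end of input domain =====

-- B replaces A's per-element set-membership test by a single adjacency scan of the sorted input (idiomatic ordered-scan form; return value only).

-- ===== PORT A =====
def score_cards (cards : List Int) : Int :=
  if cards = [] then 0
  else
    let s : PySem.Set Int := PySem.Set.ofList cards
    s.foldl (fun total c => if (c - 1) ∉ s then total + c else total) 0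

-- ===== PORT B =====
-- loop body of B: state = (total, prev)
def bStep (st : Int × Option Int) (c : Int) : Int × Option Int :=
  (match st.2 with
   | none => st.1 + c
   | some p => if c > p + 1 then st.1 + c else st.1, some c)

def score_cards_alt (cards : List Int) : Int :=
  ((PySem.List.sorted cards (fun x => x) false).foldl bStep (0, none)).1

-- ===== PRECONDITION & SPEC =====
def Spec_score_cards (cards : List Int) (out : Int) : Prop := out = score_cards_alt cards
instance (cards : List Int) (out : Int) : Decidable (Spec_score_cards cards out) := by unfold Spec_score_cards; infer_instance

-- ===== CLAIM (what is proved, stated in full; the proofs are below) =====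
def Claim_equal_score_cards : Prop := ∀ (cards : List Int), Dom_score_cards cards → Spec_score_cards cards (score_cards cards)

-- ===== LEMMAS AND PROOFS =====

-- the common value: sum of the distinct run-start values of cards
def runStartSum (cards : List Int) : Int :=
  ∑ v ∈ cards.toFinset.filter (fun v => (v - 1) ∉ cards), v

-- A-side: fold of "if P then acc+c" is acc + sum of filter
theorem foldl_if_add_sum (P : Int → Prop) [DecidablePred P] :
    ∀ (l : List Int) (acc : Int),
      l.foldl (fun t c => if P c then t + c else t) acc
        = acc + (l.filter (fun c => decide (P c))).sum := by
  intro l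
  induction l with
  | nil => intro acc; simp
  | cons c rest ih =>
      intro acc
      by_cases h : P c <;> simp [List.foldl_cons, h, ih] <;> ring

theorem A_eq_runStartSum (cards : List Int) : score_cards cards = runStartSum cards := by
  by_cases hnil : cards = []
  · simp [score_cards, runStartSum, hnil]
  · unfold score_cards
    rw [if_neg hnil]
    rw [foldl_if_add_sum (fun c => (c - 1) ∉ PySem.Set.ofList cards)
      (PySem.Set.ofList cards) 0]
    have hfc : (PySem.Set.ofList cards).filter (fun c => decide ((c - 1) ∉ PySem.Set.ofList cards))
        = (PySem.Set.ofList cards).filter (fun c => decide ((c - 1) ∉ cards)) := by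
      apply List.filter_congr
      intro x _
      simp [PySem.Set.mem_ofList]
    rw [hfc]
    have hnd : (PySem.Set.ofList cards).Nodup := PySem.Set.nodup_ofList cards
    have hndf : ((PySem.Set.ofList cards).filter (fun c => decide ((c - 1) ∉ cards))).Nodup :=
      hnd.filter _
    have hsum : ((PySem.Set.ofList cards).filter (fun c => decide ((c - 1) ∉ cards))).sum
        = ∑ v ∈ ((PySem.Set.ofList cards).filter (fun c => decide ((c - 1) ∉ cards))).toFinset, v := by
      rw [List.sum_toFinset _ hndf]
      simp
    rw [hsum]
    have hset : ((PySem.Set.ofList cards).filter (fun c => decide ((c - 1) ∉ cards))).toFinset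
        = cards.toFinset.filter (fun v => (v - 1) ∉ cards) := by
      ext v
      simp [PySem.Set.mem_ofList]
    rw [hset]
    simp [runStartSum]

-- B-side loop invariant: over a sorted tail whose elements all dominate q
theorem B_go (l : List Int) (hs : l.Pairwise (· ≤ ·)) :
    ∀ (q : Int), (∀ x ∈ l, q ≤ x) → ∀ (acc : Int),
      (l.foldl bStep (acc, some q)).1
        = acc + ∑ v ∈ l.toFinset.filter (fun v => q + 1 < v ∧ (v - 1) ∉ l), v := by
  induction l with
  | nil => intro q _ acc; simp
  | cons c rest ih =>
      intro q hq acc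
      have hc : q ≤ c := hq c (by simp)
      have hrest : ∀ x ∈ rest, c ≤ x := fun x hx => (List.pairwise_cons.mp hs).1 x hx
      have hs' : rest.Pairwise (· ≤ ·) := (List.pairwise_cons.mp hs).2
      have hstep : bStep (acc, some q) c = (if c > q + 1 then acc + c else acc, some c) := rfl
      rw [List.foldl_cons, hstep,
        ih hs' c hrest (if c > q + 1 then acc + c else acc)]
      -- set identity on the filtered finsets
      have hfin : (c :: rest).toFinset.filter (fun v => q + 1 < v ∧ (v - 1) ∉ (c :: rest))
          = (if c > q + 1 then {c} else ∅)
            ∪ rest.toFinset.filter (fun v => c + 1 < v ∧ (v - 1) ∉ rest) := by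
        ext v
        simp only [Finset.mem_filter, Finset.mem_union, List.toFinset_cons, Finset.mem_insert,
          List.mem_toFinset, List.mem_cons, not_or]
        constructor
        · rintro ⟨hv, hqv, hne, hnr⟩
          by_cases hvc : v = c
          · subst hvc; left; simp [hqv]
          · right
            have hvr : v ∈ rest := hv.resolve_left hvc
            have hcv := hrest v hvr
            exact ⟨hvr, by omega, hnr⟩
        · intro h
          rcases h with hv | ⟨hvr, hcv, hnr⟩
          · by_cases hg : c > q + 1
            · rw [if_pos hg] at hv
              simp only [Finset.mem_singleton] at hv
              subst hv
              refine ⟨Or.inl rfl, hg, by omega, ?_⟩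
              intro hmem
              have := hrest _ hmem
              omega
            · rw [if_neg hg] at hv
              simp at hv
          · have hcv' := hrest v hvr
            exact ⟨Or.inr hvr, by omega, by omega, hnr⟩
      rw [hfin]
      have hdisj : Disjoint (if c > q + 1 then ({c} : Finset Int) else ∅)
          (rest.toFinset.filter (fun v => c + 1 < v ∧ (v - 1) ∉ rest)) := by
        split
        · simp only [Finset.disjoint_singleton_left, Finset.mem_filter]
          rintro ⟨_, h, _⟩; omega
        · simp
      rw [Finset.sum_union hdisj]
      split <;> simp <;> ring

theorem B_eq_runStartSum (cards : List Int) : score_cards_alt cards = runStartSum cards := by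
  unfold score_cards_alt runStartSum
  rcases hl : PySem.List.sorted cards (fun x => x) false with _ | ⟨c, rest⟩
  · have : cards = [] := (PySem.List.sorted_eq_nil_iff cards (fun x => x) false).mp hl
    simp [this]
  · have hperm : (c :: rest).Perm cards := hl ▸ PySem.List.sorted_perm cards (fun x => x) false
    have hpw : (c :: rest).Pairwise (· ≤ ·) := by
      have := PySem.List.sorted_pairwise cards (fun x => x)
      rw [hl] at this
      exact this
    have hrest : ∀ x ∈ rest, c ≤ x := fun x hx => (List.pairwise_cons.mp hpw).1 x hx
    have h1 : ((c :: rest).foldl bStep (0, none)).1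
        = c + ∑ v ∈ rest.toFinset.filter (fun v => c + 1 < v ∧ (v - 1) ∉ rest), v := by
      have hstep : bStep ((0 : Int), none) c = (0 + c, some c) := rfl
      rw [List.foldl_cons, hstep, B_go rest (List.pairwise_cons.mp hpw).2 c hrest (0 + c)]
      ring
    rw [h1]
    -- identify with the full-list finset sum
    have hsets : cards.toFinset.filter (fun v => (v - 1) ∉ cards)
        = insert c (rest.toFinset.filter (fun v => c + 1 < v ∧ (v - 1) ∉ rest)) := by
      have hmemc : ∀ x, x ∈ cards ↔ x ∈ c :: rest := fun x => (hperm.mem_iff).symm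
      ext v
      simp only [Finset.mem_filter, Finset.mem_insert, List.mem_toFinset, hmemc, List.mem_cons,
        not_or]
      constructor
      · rintro ⟨hv, hne, hnr⟩
        by_cases hvc : v = c
        · left; exact hvc
        · right
          have hvr : v ∈ rest := hv.resolve_left hvc
          have hcv : c ≤ v := hrest v hvr
          exact ⟨hvr, by omega, hnr⟩
      · intro h
        rcases h with rfl | ⟨hvr, hcv, hnr⟩
        · refine ⟨Or.inl rfl, by omega, ?_⟩
          intro hmem
          have := hrest _ hmem
          omega
        · exact ⟨Or.inr hvr, by omega, hnr⟩
    rw [hsets, Finset.sum_insert]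
    simp only [Finset.mem_filter]
    rintro ⟨_, h, _⟩; omega

-- ===== VERDICT (by name: the statement is the Claim_ definition above) =====
theorem score_cards_spec : Claim_equal_score_cards := by
  intro cards _
  unfold Spec_score_cards
  rw [A_eq_runStartSum, B_eq_runStartSum]
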